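-- pv_equiv track=rewrite | github.com/xjwalker/code | algo/purchases.py | max_items_2
-- ===== SOURCE A (Python) =====
-- def max_items_2(matrix, budget):
--     n = len(matrix)
--     max_items = 0
--
--     # Calculate the prefix sums for each row of the matrix
--     prefix_sums = [[0] * (n + 1) for _ in range(n)]
--     for i in range(n):
--         for j in range(1, n + 1):
--             prefix_sums[i][j] = prefix_sums[i][j - 1] + matrix[i][j - 1]
--
--     # Iterate over all possible combinations of rows and columns
--     for i in range(n):
--         for j in range(i, n):
--             for k in range(n):
--                 l = k
--                 current_sum = 0
--                 # Calculate the sum of the submatrix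
--                 while l < n and current_sum + prefix_sums[j][l + 1] - prefix_sums[i][l + 1] + prefix_sums[i][k] - \
--                         prefix_sums[j][k] <= budget:
--                     current_sum += prefix_sums[j][l + 1] - prefix_sums[i][l + 1] + prefix_sums[i][k] - prefix_sums[j][k]
--                     l += 1
--                 # Update the maximum number of items
--                 max_items = max(max_items, (j - i + 1) * (l - k))
--
--     return max_items
-- ===== SOURCE B (Python) =====
-- def max_items_2(matrix, budget):
--     n = len(matrix)
--     best = 0
--     for i in range(n):
--         for j in range(i, n):
--             # prefix sums S of the per-column cost A charges: row j minus row i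
--             S = [0] * (n + 1)
--             for c in range(n):
--                 S[c + 1] = S[c] + matrix[j][c] - matrix[i][c]
--             h = j - i + 1
--             # Level-synchronous wavefront: grow all windows one column at a time,
--             # keeping only the starts whose running charge stays within budget.
--             # The pair's best area is h times the deepest level anyone survives,
--             # so no per-start inner scan and no per-start area bookkeeping.
--             active = [(k, 0) for k in range(n)]
--             m = 0
--             while active:
--                 m += 1
--                 nxt = []
--                 for k, acc in active:
--                     if k + m <= n:
--                         s = acc + S[k + m] - S[k]
--                         if s <= budget:
--                             nxt.append((k, s))
--                 active = nxt
--             best = max(best, h * (m - 1))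
--     return best
-- ===== Notes on version B (the rewrite author's own statement) =====
-- stated objective: alternative
-- what changed: B replaces A's per-start inner while-extension (and A's global per-row prefix table) by a level-synchronous wavefront per row pair: a worklist of still-affordable window starts with their running charges is filtered level by level, and the pair's best area is the height times the deepest level any start survives, so there is no per-start scan and no per-start area bookkeeping.
import Mathlib
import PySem

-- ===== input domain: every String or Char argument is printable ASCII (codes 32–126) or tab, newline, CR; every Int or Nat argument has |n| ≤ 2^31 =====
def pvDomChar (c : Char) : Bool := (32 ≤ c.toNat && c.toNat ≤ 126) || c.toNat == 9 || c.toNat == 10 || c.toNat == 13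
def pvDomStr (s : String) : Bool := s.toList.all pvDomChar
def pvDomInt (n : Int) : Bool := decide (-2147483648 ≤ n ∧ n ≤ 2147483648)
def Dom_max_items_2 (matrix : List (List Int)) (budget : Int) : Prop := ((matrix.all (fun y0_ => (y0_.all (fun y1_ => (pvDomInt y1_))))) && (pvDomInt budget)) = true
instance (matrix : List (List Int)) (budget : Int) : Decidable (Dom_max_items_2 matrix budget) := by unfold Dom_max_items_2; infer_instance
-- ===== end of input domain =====

-- B replaces A's per-start while-extension and global prefix table by a
-- level-synchronous wavefront per row pair (worklist of surviving starts);
-- alternative structure, same worst-case cost.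

-- ===== PORT A =====
-- prefix_sums[i][j] = prefix_sums[i][j-1] + matrix[i][j-1]  (row of A's table)
def buildP (row : List Int) (n : Nat) : List Int :=
  (List.range n).foldl (fun ps c => ps ++ [ps.getD c 0 + row.getD c 0]) [0]

-- A's inner while loop: l, current_sum
def goA (Pi Pj : List Int) (budget : Int) (n k : Nat) (l : Nat) (cur : Int) : Nat :=
  if _h : l < n then
    if cur + (Pj.getD (l+1) 0 - Pi.getD (l+1) 0 + Pi.getD k 0 - Pj.getD k 0) ≤ budget then
      goA Pi Pj budget n k (l+1) (cur + (Pj.getD (l+1) 0 - Pi.getD (l+1) 0 + Pi.getD k 0 - Pj.getD k 0))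
    else l
  else l
termination_by n - l

def max_items_2 (matrix : List (List Int)) (budget : Int) : Int :=
  let n := matrix.length
  let P := matrix.map (fun row => buildP row n)
  (List.range n).foldl (fun mi i =>
    (List.range' i (n - i)).foldl (fun mi j =>
      (List.range n).foldl (fun mi k =>
        let l := goA (P.getD i []) (P.getD j []) budget n k k 0
        max mi (((j : Int) - (i : Int) + 1) * ((l : Int) - (k : Int)))) mi) mi) 0

-- ===== PORT B =====
-- S[c+1] = S[c] + matrix[j][c] - matrix[i][c]
def buildS (ri rj : List Int) (n : Nat) : List Int :=
  (List.range n).foldl (fun S c => S ++ [S.getD c 0 + rj.getD c 0 - ri.getD c 0]) [0]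

-- one wavefront level: keep the starts whose running charge stays within budget
def stepW (Sl : List Int) (budget : Int) (n m : Nat) (active : List (Nat × Int)) : List (Nat × Int) :=
  active.foldl (fun nxt ka =>
    if ka.1 + m ≤ n then
      if ka.2 + Sl.getD (ka.1 + m) 0 - Sl.getD ka.1 0 ≤ budget then
        nxt ++ [(ka.1, ka.2 + Sl.getD (ka.1 + m) 0 - Sl.getD ka.1 0)]
      else nxt
    else nxt) []

-- B's while loop: deepen the wavefront until no start survives (fuel n+1 suffices)
def goW (Sl : List Int) (budget : Int) (n : Nat) (fuel : Nat) (active : List (Nat × Int)) (m : Nat) : Nat :=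
  match fuel with
  | 0 => m
  | fuel + 1 =>
    match active with
    | [] => m
    | _ => goW Sl budget n fuel (stepW Sl budget n (m+1) active) (m+1)

def max_items_2_alt (matrix : List (List Int)) (budget : Int) : Int :=
  let n := matrix.length
  (List.range n).foldl (fun best i =>
    (List.range' i (n - i)).foldl (fun best j =>
      let Sl := buildS (matrix.getD i []) (matrix.getD j []) n
      let h : Int := (j : Int) - (i : Int) + 1
      let mEnd := goW Sl budget n (n+1) ((List.range n).map (fun k => (k, (0 : Int)))) 0
      max best (h * ((mEnd : Int) - 1))) best) 0

-- ===== PRECONDITION & SPEC =====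
-- Pre_ excludes exactly the ragged inputs (some row shorter than len(matrix)) on which
-- the Python A raises IndexError (B raises there too).
def Pre_max_items_2 (matrix : List (List Int)) (_budget : Int) : Prop :=
  ∀ r ∈ matrix, matrix.length ≤ r.length
instance (matrix : List (List Int)) (budget : Int) : Decidable (Pre_max_items_2 matrix budget) := by unfold Pre_max_items_2; infer_instance

def pvWitness_max_items_2 : List (List Int) × Int := ([[1, 2], [3, 4]], 5)

def Spec_max_items_2 (matrix : List (List Int)) (budget : Int) (out : Int) : Prop := out = max_items_2_alt matrix budget
instance (matrix : List (List Int)) (budget : Int) (out : Int) : Decidable (Spec_max_items_2 matrix budget out) := by unfold Spec_max_items_2; infer_instance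

-- ===== CLAIM =====
def Claim_equal_max_items_2 : Prop := ∀ (matrix : List (List Int)) (budget : Int), Dom_max_items_2 matrix budget → Pre_max_items_2 matrix budget → Spec_max_items_2 matrix budget (max_items_2 matrix budget)

-- ===== LEMMAS AND PROOFS =====

-- partial sums of a function over an initial segment of columns
def pSum (g : Nat → Int) (t : Nat) : Int := ((List.range t).map g).sum

lemma pSum_succ (g : Nat → Int) (t : Nat) : pSum g (t+1) = pSum g t + g t := by
  simp [pSum, List.range_succ]

-- generic characterisation of the fold-built prefix lists
lemma scan_spec (g : Nat → Int) (n : Nat) :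
    ((List.range n).foldl (fun ps c => ps ++ [ps.getD c 0 + g c]) ([0] : List Int)).length = n + 1 ∧
    ∀ t, t ≤ n → ((List.range n).foldl (fun ps c => ps ++ [ps.getD c 0 + g c]) ([0] : List Int)).getD t 0 = pSum g t := by
  induction n with
  | zero => constructor <;> simp [pSum]
  | succ n ih =>
    obtain ⟨hlen, hget⟩ := ih
    rw [List.range_succ, List.foldl_append]
    set L := (List.range n).foldl (fun ps c => ps ++ [ps.getD c 0 + g c]) ([0] : List Int) with hL
    simp only [List.foldl_cons, List.foldl_nil]
    constructor
    · simp [hlen]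
    · intro t ht
      rcases Nat.lt_or_ge t (n+1) with h | h
      · rw [List.getD_append _ _ _ _ (by omega)]
        exact hget t (by omega)
      · have ht' : t = n + 1 := by omega
        subst ht'
        have : L.getD n 0 + g n = pSum g (n+1) := by rw [hget n (le_refl n), pSum_succ]
        rw [← this]
        have : n + 1 = L.length := by omega
        rw [this]
        simp

lemma buildP_getD (row : List Int) (n : Nat) :
    ∀ t, t ≤ n → (buildP row n).getD t 0 = pSum (fun c => row.getD c 0) t :=
  (scan_spec (fun c => row.getD c 0) n).2

lemma buildS_scan (ri rj : List Int) (n : Nat) :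
    buildS ri rj n = (List.range n).foldl
      (fun ps c => ps ++ [ps.getD c 0 + (fun c => rj.getD c 0 - ri.getD c 0) c]) ([0] : List Int) := by
  unfold buildS
  apply PySem.List.foldl_congr_mem
  intro acc x _
  simp [add_sub_assoc]

lemma buildS_getD (ri rj : List Int) (n : Nat) :
    ∀ t, t ≤ n → (buildS ri rj n).getD t 0 = pSum (fun c => rj.getD c 0 - ri.getD c 0) t := by
  intro t ht
  rw [buildS_scan]
  exact (scan_spec (fun c => rj.getD c 0 - ri.getD c 0) n).2 t ht

-- difference of partial sums is the partial sum of differences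
lemma pSum_sub (gi gj : Nat → Int) (t : Nat) :
    pSum (fun c => gj c - gi c) t = pSum gj t - pSum gi t := by
  induction t with
  | zero => simp [pSum]
  | succ t ih => rw [pSum_succ, pSum_succ, pSum_succ, ih]; ring

-- abstract per-start step-count: how many levels start k survives
def msRec (Sf : Nat → Int) (budget : Int) (n k : Nat) (m : Nat) (cur : Int) : Nat :=
  if _h : k + m < n then
    if cur + (Sf (k+m+1) - Sf k) ≤ budget then
      msRec Sf budget n k (m+1) (cur + (Sf (k+m+1) - Sf k))
    else m
  else m
termination_by n - (k + m)

def ms (Sf : Nat → Int) (budget : Int) (n k : Nat) : Nat := msRec Sf budget n k 0 0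

-- running charge of start k after m levels
def cum (Sf : Nat → Int) (k : Nat) : Nat → Int
  | 0 => 0
  | m + 1 => cum Sf k m + (Sf (k+m+1) - Sf k)

lemma msRec_ge (Sf : Nat → Int) (budget : Int) (n k : Nat) :
    ∀ m cur, m ≤ msRec Sf budget n k m cur := by
  have H : ∀ fuel m cur, n - (k + m) ≤ fuel → m ≤ msRec Sf budget n k m cur := by
    intro fuel
    induction fuel with
    | zero =>
      intro m cur hf
      rw [msRec, dif_neg (by omega)]
    | succ fuel ih =>
      intro m cur hf
      rw [msRec]
      split_ifs with h1 h2
      · have := ih (m+1) (cur + (Sf (k+m+1) - Sf k)) (by omega)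
        omega
      · exact le_refl m
      · exact le_refl m
  intro m cur
  exact H (n - (k+m)) m cur (le_refl _)

lemma msRec_le (Sf : Nat → Int) (budget : Int) (n k : Nat) :
    ∀ m cur, k + m ≤ n → msRec Sf budget n k m cur ≤ n - k := by
  have H : ∀ fuel m cur, n - (k + m) ≤ fuel → k + m ≤ n → msRec Sf budget n k m cur ≤ n - k := by
    intro fuel
    induction fuel with
    | zero =>
      intro m cur hf hle
      rw [msRec, dif_neg (by omega)]
      omega
    | succ fuel ih =>
      intro m cur hf hle
      rw [msRec]
      split_ifs with h1 h2
      · exact ih (m+1) _ (by omega) (by omega)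
      · omega
      · omega
  intro m cur hle
  exact H (n - (k+m)) m cur (le_refl _) hle

lemma ms_le (Sf : Nat → Int) (budget : Int) (n k : Nat) (hk : k ≤ n) :
    ms Sf budget n k ≤ n - k := msRec_le Sf budget n k 0 0 (by omega)

-- msRec restarted at a survived level agrees with ms
lemma msRec_cum (Sf : Nat → Int) (budget : Int) (n k : Nat) :
    ∀ m, m ≤ ms Sf budget n k → msRec Sf budget n k m (cum Sf k m) = ms Sf budget n k := by
  intro m
  induction m with
  | zero => intro _; rfl
  | succ m ih =>
    intro hm1
    have hm : m ≤ ms Sf budget n k := by omega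
    have IH := ih hm
    by_cases h1 : k + m < n
    · by_cases h2 : cum Sf k m + (Sf (k+m+1) - Sf k) ≤ budget
      · rw [msRec, dif_pos h1, if_pos h2] at IH
        rw [← IH]
        rfl
      · rw [msRec, dif_pos h1, if_neg h2] at IH
        omega
    · rw [msRec, dif_neg h1] at IH
      omega

-- one more level is survived iff the next charge stays within budget
lemma ms_succ_iff (Sf : Nat → Int) (budget : Int) (n k m : Nat)
    (hm : m ≤ ms Sf budget n k) :
    m + 1 ≤ ms Sf budget n k ↔ (k + m < n ∧ cum Sf k m + (Sf (k+m+1) - Sf k) ≤ budget) := by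
  have IH := msRec_cum Sf budget n k m hm
  constructor
  · intro hm1
    by_cases h1 : k + m < n
    · by_cases h2 : cum Sf k m + (Sf (k+m+1) - Sf k) ≤ budget
      · exact ⟨h1, h2⟩
      · rw [msRec, dif_pos h1, if_neg h2] at IH
        omega
    · rw [msRec, dif_neg h1] at IH
      omega
  · rintro ⟨h1, h2⟩
    rw [msRec, dif_pos h1, if_pos h2] at IH
    have := msRec_ge Sf budget n k (m+1) (cum Sf k m + (Sf (k+m+1) - Sf k))
    omega

-- A's while loop is msRec (offset by k)
lemma goA_eq_msRec (Pi Pj : List Int) (Sf : Nat → Int) (budget : Int) (n k : Nat)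
    (hv : ∀ t, t ≤ n → Pj.getD t 0 - Pi.getD t 0 = Sf t) (hk : k ≤ n) :
    ∀ fuel m cur, n - (k + m) = fuel →
      goA Pi Pj budget n k (k+m) cur = k + msRec Sf budget n k m cur := by
  intro fuel
  induction fuel with
  | zero =>
    intro m cur hf
    rw [goA, msRec, dif_neg (by omega), dif_neg (by omega)]
  | succ fuel ih =>
    intro m cur hf
    have hlt : k + m < n := by omega
    have hterm : Pj.getD (k+m+1) 0 - Pi.getD (k+m+1) 0 + Pi.getD k 0 - Pj.getD k 0
        = Sf (k+m+1) - Sf k := by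
      have h1 := hv (k+m+1) (by omega)
      have h2 := hv k hk
      omega
    rw [goA, msRec, dif_pos hlt, dif_pos hlt]
    by_cases hc : cur + (Sf (k+m+1) - Sf k) ≤ budget
    · rw [if_pos (by omega), if_pos hc]
      have := ih (m+1) (cur + (Sf (k+m+1) - Sf k)) (by omega)
      rw [show k + m + 1 = k + (m+1) by omega] at this ⊢
      rw [show cur + (Pj.getD (k+(m+1)) 0 - Pi.getD (k+(m+1)) 0 + Pi.getD k 0 - Pj.getD k 0)
            = cur + (Sf (k+(m+1)) - Sf k) by rw [show k+(m+1) = k+m+1 by omega] at *; omega]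
      exact this
    · rw [if_neg (by omega), if_neg hc]

-- stepW is a filterMap
lemma stepW_eq (Sl : List Int) (budget : Int) (n m : Nat) :
    ∀ (active acc : List (Nat × Int)),
      active.foldl (fun nxt ka =>
        if ka.1 + m ≤ n then
          if ka.2 + Sl.getD (ka.1 + m) 0 - Sl.getD ka.1 0 ≤ budget then
            nxt ++ [(ka.1, ka.2 + Sl.getD (ka.1 + m) 0 - Sl.getD ka.1 0)]
          else nxt
        else nxt) acc
      = acc ++ active.filterMap (fun ka =>
          if ka.1 + m ≤ n ∧ ka.2 + Sl.getD (ka.1 + m) 0 - Sl.getD ka.1 0 ≤ budget then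
            some (ka.1, ka.2 + Sl.getD (ka.1 + m) 0 - Sl.getD ka.1 0)
          else none) := by
  intro active
  induction active with
  | nil => intro acc; simp
  | cons ka t ih =>
    intro acc
    simp only [List.foldl_cons, List.filterMap_cons]
    by_cases h1 : ka.1 + m ≤ n
    · by_cases h2 : ka.2 + Sl.getD (ka.1 + m) 0 - Sl.getD ka.1 0 ≤ budget
      · rw [if_pos h1, if_pos h2, if_pos ⟨h1, h2⟩, ih]
        simp
      · rw [if_pos h1, if_neg h2, if_neg (by tauto), ih]
    · rw [if_neg h1, if_neg (by tauto), ih]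

-- the wavefront invariant is preserved by one level
lemma stepW_inv (Sl : List Int) (Sf : Nat → Int) (budget : Int) (n m : Nat)
    (hS : ∀ t, t ≤ n → Sl.getD t 0 = Sf t) :
    ∀ (ks : List Nat), (∀ k ∈ ks, k < n) →
      stepW Sl budget n (m+1)
        ((ks.filter (fun k => decide (m ≤ ms Sf budget n k))).map (fun k => (k, cum Sf k m)))
      = (ks.filter (fun k => decide (m+1 ≤ ms Sf budget n k))).map (fun k => (k, cum Sf k (m+1))) := by
  intro ks hks
  unfold stepW
  rw [stepW_eq, List.nil_append, List.filterMap_map]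
  induction ks with
  | nil => simp
  | cons k t ih =>
    have hk : k < n := hks k (by simp)
    have ih2 := ih (fun x hx => hks x (by simp [hx]))
    simp only [List.filter_cons]
    by_cases hp : m ≤ ms Sf budget n k
    · rw [if_pos (by simpa using hp)]
      simp only [List.filterMap_cons, Function.comp_apply]
      by_cases hq : m + 1 ≤ ms Sf budget n k
      · obtain ⟨h1, h2⟩ := (ms_succ_iff Sf budget n k m hp).mp hq
        have e1 : Sl.getD (k + (m+1)) 0 = Sf (k+m+1) := by
          rw [show k + (m+1) = k+m+1 by omega]; exact hS _ (by omega)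
        have e2 : Sl.getD k 0 = Sf k := hS _ (by omega)
        rw [if_pos (by rw [e1, e2]; exact ⟨by omega, by omega⟩)]
        rw [if_pos (by simpa using hq)]
        simp only [List.map_cons, List.cons.injEq]
        refine ⟨?_, ih2⟩
        rw [e1, e2]
        show (k, cum Sf k m + Sf (k+m+1) - Sf k) = (k, cum Sf k m + (Sf (k+m+1) - Sf k))
        rw [Prod.mk.injEq]
        exact ⟨rfl, by ring⟩
      · rw [if_neg ?hc]
        case hc =>
          rintro ⟨c1, c2⟩
          apply hq
          rw [ms_succ_iff Sf budget n k m hp]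
          have e1 : Sl.getD (k + (m+1)) 0 = Sf (k+m+1) := by
            rw [show k + (m+1) = k+m+1 by omega]; exact hS _ (by omega)
          have e2 : Sl.getD k 0 = Sf k := hS _ (by omega)
          rw [e1, e2] at c2
          exact ⟨by omega, by omega⟩
        rw [if_neg (by simpa using hq)]
        exact ih2
    · rw [if_neg (by simpa using hp), if_neg (by simp; omega)]
      exact ih2

-- goW computes 1 + the deepest surviving level
lemma goW_spec (Sl : List Int) (Sf : Nat → Int) (budget : Int) (n : Nat)
    (hS : ∀ t, t ≤ n → Sl.getD t 0 = Sf t) (M : Nat)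
    (hub : ∀ k, k < n → ms Sf budget n k ≤ M)
    (hat : ∃ k, k < n ∧ ms Sf budget n k = M) :
    ∀ fuel m, m ≤ M + 1 → M + 1 ≤ m + fuel →
      goW Sl budget n fuel
        (((List.range n).filter (fun k => decide (m ≤ ms Sf budget n k))).map (fun k => (k, cum Sf k m))) m
      = M + 1 := by
  intro fuel
  induction fuel with
  | zero =>
    intro m h1 h2
    have : m = M + 1 := by omega
    subst this
    rfl
  | succ fuel ih =>
    intro m h1 h2
    cases hA : ((List.range n).filter (fun k => decide (m ≤ ms Sf budget n k))).map
        (fun k => (k, cum Sf k m)) with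
    | nil =>
      rw [goW]
      obtain ⟨k, hkn, hkM⟩ := hat
      have hfil : (List.range n).filter (fun k => decide (m ≤ ms Sf budget n k)) = [] := by
        by_contra hne
        exact absurd (congrArg List.length hA) (by simp [hne])
      have hk' : ¬ (m ≤ ms Sf budget n k) := by
        intro hle
        have : k ∈ (List.range n).filter (fun k => decide (m ≤ ms Sf budget n k)) := by
          simp [List.mem_filter, List.mem_range, hkn, hle]
        rw [hfil] at this
        simp at this
      omega
    | cons hd tl =>
      have hne : ((List.range n).filter (fun k => decide (m ≤ ms Sf budget n k))) ≠ [] := by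
        intro h; rw [h] at hA; simp at hA
      obtain ⟨k, hkmem⟩ := List.exists_mem_of_ne_nil _ hne
      rw [List.mem_filter, List.mem_range] at hkmem
      have hkm : m ≤ ms Sf budget n k := by simpa using hkmem.2
      have hmM : m ≤ M := le_trans hkm (hub k hkmem.1)
      have hstep := stepW_inv Sl Sf budget n m hS (List.range n) (fun x hx => List.mem_range.mp hx)
      rw [hA] at hstep
      rw [goW, hstep]
      · exact ih (m+1) (by omega) (by omega)
      · intro h
        simp at h

-- folding max over values bounded by and attaining X
lemma foldl_max_le (f : Nat → Int) (X : Int) :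
    ∀ (l : List Nat) (a : Int), (∀ k ∈ l, f k ≤ X) → X ≤ a →
      l.foldl (fun b k => max b (f k)) a = a := by
  intro l
  induction l with
  | nil => intro a _ _; rfl
  | cons k t ih =>
    intro a hb ha
    simp only [List.foldl_cons]
    rw [max_eq_left (le_trans (hb k (by simp)) ha)]
    exact ih a (fun x hx => hb x (by simp [hx])) ha

lemma foldl_max_eq (f : Nat → Int) (X : Int) :
    ∀ (l : List Nat) (a : Int), (∀ k ∈ l, f k ≤ X) → (∃ k ∈ l, f k = X) →
      l.foldl (fun b k => max b (f k)) a = max a X := by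
  intro l
  induction l with
  | nil => intro a _ h; simp at h
  | cons k t ih =>
    intro a hb hex
    simp only [List.foldl_cons]
    by_cases hat : ∃ x ∈ t, f x = X
    · rw [ih (max a (f k)) (fun x hx => hb x (by simp [hx])) hat]
      rw [max_assoc, max_eq_right (hb k (by simp))]
    · have hfk : f k = X := by
        obtain ⟨x, hx, hfx⟩ := hex
        rcases List.mem_cons.mp hx with h | h
        · rw [← h]; exact hfx
        · exact absurd ⟨x, h, hfx⟩ hat
      rw [hfk]
      exact foldl_max_le f X t (max a X) (fun x hx => hb x (by simp [hx])) (le_max_right a X)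

-- a maximum of f over [0, n) exists and is attained (n ≥ 1)
lemma exists_max (f : Nat → Nat) (n : Nat) (hn : 0 < n) :
    ∃ M, (∀ k, k < n → f k ≤ M) ∧ (∃ k, k < n ∧ f k = M) := by
  induction n with
  | zero => omega
  | succ n ih =>
    rcases Nat.eq_zero_or_pos n with h0 | hpos
    · subst h0
      refine ⟨f 0, ?_, 0, by omega, rfl⟩
      intro k hk
      have hk0 : k = 0 := by omega
      rw [hk0]
    · obtain ⟨M, hub, k, hk, hke⟩ := ih hpos
      by_cases h : f n ≤ M
      · refine ⟨M, fun x hx => ?_, k, by omega, hke⟩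
        rcases Nat.lt_succ_iff_lt_or_eq.mp hx with h' | h'
        · exact hub x h'
        · rw [h']; exact h
      · refine ⟨f n, fun x hx => ?_, n, by omega, rfl⟩
        rcases Nat.lt_succ_iff_lt_or_eq.mp hx with h' | h'
        · exact le_trans (hub x h') (by omega)
        · rw [h']

-- the per-(i,j) equality of the two inner computations
lemma pair_eq (matrix : List (List Int)) (budget : Int) (n i j : Nat)
    (hn : n = matrix.length) (hi : i < n) (hj : j < n) (hij : i ≤ j)
    (hP : ∀ t, t < n → ((matrix.map (fun row => buildP row n)).getD t []) = buildP (matrix.getD t []) n)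
    (acc : Int) :
    (List.range n).foldl (fun mi k =>
        max mi (((j : Int) - (i : Int) + 1) *
          (((goA ((matrix.map (fun row => buildP row n)).getD i [])
               ((matrix.map (fun row => buildP row n)).getD j []) budget n k k 0 : Nat) : Int) - (k : Int)))) acc
    = max acc (((j : Int) - (i : Int) + 1) *
        (((goW (buildS (matrix.getD i []) (matrix.getD j []) n) budget n (n+1)
            ((List.range n).map (fun k => (k, (0 : Int)))) 0 : Nat) : Int) - 1)) := by
  set g : Nat → Int := fun c => (matrix.getD j []).getD c 0 - (matrix.getD i []).getD c 0 with hg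
  set Sf : Nat → Int := fun t => pSum g t with hSf
  have hv : ∀ t, t ≤ n →
      ((matrix.map (fun row => buildP row n)).getD j []).getD t 0
        - ((matrix.map (fun row => buildP row n)).getD i []).getD t 0 = Sf t := by
    intro t ht
    rw [hP i hi, hP j hj, buildP_getD _ n t ht, buildP_getD _ n t ht, hSf, hg, ← pSum_sub]
  have hS : ∀ t, t ≤ n → (buildS (matrix.getD i []) (matrix.getD j []) n).getD t 0 = Sf t :=
    fun t ht => buildS_getD _ _ n t ht
  obtain ⟨M, hub, kM, hkMn, hkM⟩ := exists_max (fun k => ms Sf budget n k) n (by omega)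
  have hMle : M ≤ n := by
    have := ms_le Sf budget n kM (by omega)
    omega
  have hstart : ((List.range n).map (fun k => (k, (0 : Int)))) =
      ((List.range n).filter (fun k => decide (0 ≤ ms Sf budget n k))).map (fun k => (k, cum Sf k 0)) := by
    rw [List.filter_eq_self.mpr (by intro a _; simp)]
    rfl
  have hgoW : goW (buildS (matrix.getD i []) (matrix.getD j []) n) budget n (n+1)
      ((List.range n).map (fun k => (k, (0 : Int)))) 0 = M + 1 := by
    rw [hstart]
    exact goW_spec _ Sf budget n hS M hub ⟨kM, hkMn, hkM⟩ (n+1) 0 (by omega) (by omega)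
  have hAk : ∀ k, k < n →
      goA ((matrix.map (fun row => buildP row n)).getD i [])
          ((matrix.map (fun row => buildP row n)).getD j []) budget n k k 0
        = k + ms Sf budget n k := by
    intro k hk
    have h := goA_eq_msRec _ _ Sf budget n k hv (by omega) (n - k) 0 0 (by omega)
    simpa using h
  have hh0 : (0 : Int) ≤ (j : Int) - (i : Int) + 1 := by
    have : (i : Int) ≤ (j : Int) := by exact_mod_cast hij
    omega
  rw [hgoW]
  have hcast : (((M + 1 : Nat) : Int) - 1) = (M : Int) := by push_cast; ring
  rw [hcast]
  have hbody : (List.range n).foldl (fun mi k =>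
        max mi (((j : Int) - (i : Int) + 1) *
          (((goA ((matrix.map (fun row => buildP row n)).getD i [])
               ((matrix.map (fun row => buildP row n)).getD j []) budget n k k 0 : Nat) : Int) - (k : Int)))) acc
      = (List.range n).foldl (fun mi k =>
          max mi (((j : Int) - (i : Int) + 1) * ((ms Sf budget n k : Nat) : Int))) acc := by
    apply PySem.List.foldl_congr_mem
    intro a k hk
    rw [hAk k (List.mem_range.mp hk)]
    congr 2
    push_cast
    ring
  rw [hbody]
  apply foldl_max_eq (fun k => ((j : Int) - (i : Int) + 1) * ((ms Sf budget n k : Nat) : Int))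
  · intro k hk
    apply mul_le_mul_of_nonneg_left _ hh0
    exact_mod_cast hub k (List.mem_range.mp hk)
  · exact ⟨kM, List.mem_range.mpr hkMn, by rw [hkM]⟩

-- ===== VERDICT =====
theorem max_items_2_spec : Claim_equal_max_items_2 := by
  intro matrix budget _ _
  unfold Spec_max_items_2
  simp only [max_items_2, max_items_2_alt]
  have hP : ∀ t, t < matrix.length →
      ((matrix.map (fun row => buildP row matrix.length)).getD t []) = buildP (matrix.getD t []) matrix.length := by
    intro t ht
    rw [List.getD_eq_getElem?_getD, List.getD_eq_getElem?_getD]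
    rw [List.getElem?_map]
    rw [List.getElem?_eq_getElem ht]
    simp
  apply PySem.List.foldl_congr_mem
  intro acc i hi
  have hi' : i < matrix.length := List.mem_range.mp hi
  apply PySem.List.foldl_congr_mem
  intro acc j hj
  have hj' : j < matrix.length := by
    have := List.mem_range'_1.mp hj
    omega
  have hij : i ≤ j := by
    have := List.mem_range'_1.mp hj
    omega
  exact pair_eq matrix budget matrix.length i j rfl hi' hj' hij hP acc
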